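-- pv_equiv track=rewrite | github.com/mileoa/28tasks | white_walkers/white_walkers.py | white_walkers
-- ===== SOURCE A (Python) =====
-- NEEDED_ENEMIES_AMOUNT = 3
--
-- DIGITS_SUM_TO_DO_SEARCH = 10
--
-- ASCII_CODE_OF_CHAR_1 = 49
--
-- ASCII_CODE_OF_CHAR_9 = 57
--
-- ENEMY_SYMBOL = "="
--
-- def white_walkers(village: str) -> bool:
--     """Return whether there are enemies."""
--     found_valid_pair: bool = False
--     for i, el_i in enumerate(village):
--         if ord(el_i) < ASCII_CODE_OF_CHAR_1 or ord(el_i) > ASCII_CODE_OF_CHAR_9: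
--             continue
--         enemies_count: int = 0
--         for j in range(i + 1, len(village)):
--             el_j: str = village[j]
--             if el_j == ENEMY_SYMBOL:
--                 enemies_count += 1
--                 continue
--             if ord(el_j) < ASCII_CODE_OF_CHAR_1 or ord(el_j) > ASCII_CODE_OF_CHAR_9:
--                 continue
--             if int(el_i) + int(el_j) != DIGITS_SUM_TO_DO_SEARCH:
--                 continue
--             if enemies_count < NEEDED_ENEMIES_AMOUNT:
--                 return False
--             found_valid_pair = True
--
--     return found_valid_pair
-- ===== SOURCE B (Python) =====
-- def white_walkers(village: str) -> bool:
--     """Return whether there are enemies."""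
--     eq_count = 0          # '=' seen so far
--     last_seen = {}        # digit value -> eq_count at its latest occurrence
--     found = False
--     for ch in village:
--         if ch == "=":
--             eq_count += 1
--         elif "1" <= ch <= "9":
--             d = ord(ch) - 48
--             comp = 10 - d
--             if comp in last_seen:
--                 if eq_count - last_seen[comp] < 3:
--                     return False
--                 found = True
--             last_seen[d] = eq_count
--     return found
-- ===== Notes on version B (the rewrite author's own statement) =====
-- stated objective: alternative
-- what changed: Replaced A's per-digit rescan of the whole remaining string by a single left-to-right pass that keeps a running '=' count and a dict from digit value to the '=' count at its latest occurrence, looking up the complement digit in O(1); correct because the latest occurrence of the complement minimizes the number of '=' in between, so checking it alone decides the all-pairs condition.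
import Mathlib
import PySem

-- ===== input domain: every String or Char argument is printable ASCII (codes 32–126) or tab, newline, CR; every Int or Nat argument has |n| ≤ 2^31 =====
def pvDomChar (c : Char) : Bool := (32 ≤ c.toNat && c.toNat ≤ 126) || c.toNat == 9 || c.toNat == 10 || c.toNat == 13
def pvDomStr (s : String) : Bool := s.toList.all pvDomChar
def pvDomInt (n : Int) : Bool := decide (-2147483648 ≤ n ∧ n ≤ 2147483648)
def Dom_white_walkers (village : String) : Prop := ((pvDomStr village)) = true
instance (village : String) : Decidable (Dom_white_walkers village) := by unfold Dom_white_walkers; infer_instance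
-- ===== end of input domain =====

-- B replaces A's per-digit rescans of the suffix by one pass keeping the running '=' count and,
-- per digit value, the '=' count at its latest occurrence (objective: alternative).

-- ===== PORT A =====
-- int(c) for a single digit character
def pvDv (c : Char) : Int := (c.toNat : Int) - 48

-- inner 'for j in range(i+1, len(village))' loop; none = the early 'return False'
def pvInnerA (el_i : Char) : List Char → Int → Bool → Option Bool
  | [], _, found => some found
  | el_j :: rest, enemies, found =>
    if el_j = '=' then pvInnerA el_i rest (enemies + 1) found
    else if el_j.toNat < 49 ∨ 57 < el_j.toNat then pvInnerA el_i rest enemies found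
    else if pvDv el_i + pvDv el_j ≠ 10 then pvInnerA el_i rest enemies found
    else if enemies < 3 then none
    else pvInnerA el_i rest enemies true

-- outer 'for i, el_i in enumerate(village)' loop
def pvOuterA : List Char → Bool → Option Bool
  | [], found => some found
  | el_i :: rest, found =>
    if el_i.toNat < 49 ∨ 57 < el_i.toNat then pvOuterA rest found
    else
      match pvInnerA el_i rest 0 found with
      | none => none
      | some f => pvOuterA rest f

def white_walkers (village : String) : Bool :=
  (pvOuterA village.toList false).getD false

-- ===== PORT B =====
-- single pass: eq = '=' seen so far, last = digit value ↦ eq at its latest occurrence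
def pvLoopB : List Char → Int → PySem.Dict Int Int → Bool → Option Bool
  | [], _, _, found => some found
  | ch :: rest, eq, last, found =>
    if ch = '=' then pvLoopB rest (eq + 1) last found
    else if '1' ≤ ch ∧ ch ≤ '9' then
      let d : Int := pvDv ch
      match last.get? (10 - d) with
      | some v =>
        if eq - v < 3 then none
        else pvLoopB rest eq (last.insert d eq) true
      | none => pvLoopB rest eq (last.insert d eq) found
    else pvLoopB rest eq last found

def white_walkers_alt (village : String) : Bool :=
  (pvLoopB village.toList 0 PySem.Dict.empty false).getD false

-- ===== PRECONDITION & SPEC =====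
def Spec_white_walkers (village : String) (out : Bool) : Prop := out = white_walkers_alt village
instance (village : String) (out : Bool) : Decidable (Spec_white_walkers village out) := by unfold Spec_white_walkers; infer_instance

-- ===== CLAIM (what is proved, stated in full; the proofs are below) =====
def Claim_equal_white_walkers : Prop := ∀ (village : String), Dom_white_walkers village → Spec_white_walkers village (white_walkers village)

-- ===== LEMMAS AND PROOFS =====

def pvIsDig (c : Char) : Bool := !(decide (c.toNat < 49) || decide (57 < c.toNat))

-- the digits of the string, each paired with the number of '=' before it (offset by e)
def pvDL : List Char → Int → List (Int × Int)
  | [], _ => []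
  | c :: r, e =>
    if c = '=' then pvDL r (e + 1)
    else if pvIsDig c then (pvDv c, e) :: pvDL r e
    else pvDL r e

-- every ordered pair summing to 10 has ≥ 3 '=' between
def pvOk : List (Int × Int) → Bool
  | [] => true
  | p :: l => (l.all fun q => !(p.1 + q.1 == 10) || decide (3 ≤ q.2 - p.2)) && pvOk l

-- some ordered pair sums to 10
def pvEx : List (Int × Int) → Bool
  | [] => false
  | p :: l => (l.any fun q => p.1 + q.1 == 10) || pvEx l

def pvCrossOk (h l : List (Int × Int)) : Bool :=
  l.all fun q => h.all fun p => !(p.1 + q.1 == 10) || decide (3 ≤ q.2 - p.2)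

def pvCrossEx (h l : List (Int × Int)) : Bool :=
  l.any fun q => h.any fun p => p.1 + q.1 == 10

theorem pvAllAnd {α : Type} (l : List α) (p q : α → Bool) :
    (l.all fun x => p x && q x) = (l.all p && l.all q) := by
  induction l with
  | nil => rfl
  | cons x l ih =>
    simp only [List.all_cons, ih]
    cases p x <;> cases q x <;> cases l.all p <;> cases l.all q <;> rfl

theorem pvAnyOr {α : Type} (l : List α) (p q : α → Bool) :
    (l.any fun x => p x || q x) = (l.any p || l.any q) := by
  induction l with
  | nil => rfl
  | cons x l ih =>
    simp only [List.any_cons, ih]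
    cases p x <;> cases q x <;> cases l.any p <;> cases l.any q <;> rfl

-- B over the digit list, dict state
def pvSpecD : List (Int × Int) → PySem.Dict Int Int → Bool → Option Bool
  | [], _, f => some f
  | (b, e) :: l, last, f =>
    match last.get? (10 - b) with
    | some v => if e - v < 3 then none else pvSpecD l (last.insert b e) true
    | none => pvSpecD l (last.insert b e) f

-- B over the digit list, newest-first history list
def pvSpecL : List (Int × Int) → List (Int × Int) → Bool → Option Bool
  | [], _, f => some f
  | (b, e) :: l, h, f =>
    match h.find? (fun p => p.1 == 10 - b) with
    | some p0 => if e - p0.2 < 3 then none else pvSpecL l ((b, e) :: h) true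
    | none => pvSpecL l ((b, e) :: h) f

theorem pvDL_shift (cs : List Char) : ∀ e : Int,
    pvDL cs e = (pvDL cs 0).map (fun p => (p.1, p.2 + e)) := by
  induction cs with
  | nil => intro e; simp [pvDL]
  | cons c r ih =>
    intro e
    simp only [pvDL]
    split
    · rw [ih (e + 1), ih (0 + 1)]
      simp only [List.map_map]
      apply List.map_congr_left
      intro p _
      simp only [Function.comp]
      refine Prod.ext rfl ?_
      simp; omega
    · split
      · rw [ih e]; simp
      · exact ih e

theorem pvDL_mono (cs : List Char) : ∀ e : Int,
    (∀ p ∈ pvDL cs e, e ≤ p.2) ∧ (pvDL cs e).Pairwise (fun p q => p.2 ≤ q.2) := by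
  induction cs with
  | nil => intro e; simp [pvDL]
  | cons c r ih =>
    intro e
    simp only [pvDL]
    split
    · refine ⟨fun p hp => ?_, (ih (e + 1)).2⟩
      have := (ih (e + 1)).1 p hp; omega
    · split
      · refine ⟨?_, ?_⟩
        · intro p hp
          rcases List.mem_cons.mp hp with h | h
          · subst h; simp
          · exact (ih e).1 p h
        · exact List.pairwise_cons.mpr ⟨fun q hq => (ih e).1 q hq, (ih e).2⟩
      · exact ih e

theorem pvInnerA_char (a : Char) (rest : List Char) : ∀ (cnt : Int) (found : Bool),
    pvInnerA a rest cnt found =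
      if ((pvDL rest cnt).all fun q => !(pvDv a + q.1 == 10) || decide (3 ≤ q.2)) then
        some (found || ((pvDL rest cnt).any fun q => pvDv a + q.1 == 10))
      else none := by
  induction rest with
  | nil => intro cnt found; simp [pvInnerA, pvDL]
  | cons c r ih =>
    intro cnt found
    simp only [pvInnerA, pvDL]
    by_cases hq : c = '='
    · simp only [if_pos hq]; exact ih (cnt + 1) found
    · simp only [if_neg hq]
      by_cases hd : c.toNat < 49 ∨ 57 < c.toNat
      · have hnd : pvIsDig c = false := by
          simp only [pvIsDig]; rcases hd with h | h <;> simp [h]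
        simp only [if_pos hd, hnd, Bool.false_eq_true, if_false]
        exact ih cnt found
      · have hyd : pvIsDig c = true := by
          simp only [pvIsDig]; push Not at hd; simp [hd.1, hd.2]
        simp only [if_neg hd, hyd, if_true]
        by_cases hs : pvDv a + pvDv c ≠ 10
        · have hs' : (pvDv a + pvDv c == 10) = false := by simp; omega
          simp only [if_pos hs, List.all_cons, List.any_cons, hs', Bool.not_false,
            Bool.false_or]
          exact ih cnt found
        · push Not at hs
          have hs' : (pvDv a + pvDv c == 10) = true := by simp [hs]
          by_cases hc : cnt < 3
          · have : decide (3 ≤ cnt) = false := by simp; omega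
            simp [hs, hc, this]
          · have h3 : decide (3 ≤ cnt) = true := by simp; omega
            have hsne : ¬(pvDv a + pvDv c ≠ 10) := by omega
            simp only [if_neg hsne, if_neg hc, List.all_cons, List.any_cons, hs',
              Bool.not_true, Bool.false_or, h3, Bool.true_and, Bool.true_or]
            rw [ih cnt true]
            split <;> simp

theorem pvOuterA_char (cs : List Char) : ∀ (e : Int) (found : Bool),
    pvOuterA cs found =
      if pvOk (pvDL cs e) then some (found || pvEx (pvDL cs e)) else none := by
  induction cs with
  | nil => intro e found; simp [pvOuterA, pvDL, pvOk, pvEx]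
  | cons c r ih =>
    intro e found
    simp only [pvOuterA, pvDL]
    by_cases hd : c.toNat < 49 ∨ 57 < c.toNat
    · have hq : ¬ (c = '=') ∨ c = '=' := (em _).symm
      have hnd : pvIsDig c = false := by
        simp only [pvIsDig]; rcases hd with h | h <;> simp [h]
      simp only [if_pos hd]
      rcases hq with hq | hq
      · simp only [if_neg hq, hnd, Bool.false_eq_true, if_false]; exact ih e found
      · simp only [if_pos hq]; exact ih (e + 1) found
    · have hq : ¬ (c = '=') := by
        intro h; subst h; revert hd; decide
      have hyd : pvIsDig c = true := by
        simp only [pvIsDig]; push Not at hd; simp [hd.1, hd.2]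
      simp only [if_neg hd, if_neg hq, hyd, if_true]
      rw [pvInnerA_char c r 0 found]
      -- shift the inner characterisation from offset 0 to offset e
      have hsh := pvDL_shift r e
      have hall : ((pvDL r 0).all fun q => !(pvDv c + q.1 == 10) || decide (3 ≤ q.2))
          = ((pvDL r e).all fun q => !(pvDv c + q.1 == 10) || decide (3 ≤ q.2 - e)) := by
        rw [hsh, List.all_map]
        congr 1
        funext q
        simp only [Function.comp_apply]
        rw [show q.2 + e - e = q.2 from by omega]
      have hany : ((pvDL r 0).any fun q => pvDv c + q.1 == 10)
          = ((pvDL r e).any fun q => pvDv c + q.1 == 10) := by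
        rw [hsh, List.any_map]; rfl
      rw [hall, hany]
      simp only [pvOk, pvEx]
      by_cases hok : ((pvDL r e).all fun q => !(pvDv c + q.1 == 10) || decide (3 ≤ q.2 - e)) = true
      · simp only [hok, if_true, Bool.true_and]
        rw [ih e (found || ((pvDL r e).any fun q => pvDv c + q.1 == 10))]
        split <;> simp [Bool.or_assoc]
      · simp only [hok, if_false, Bool.false_and, Bool.false_eq_true]

theorem pvLoopB_spec (cs : List Char) : ∀ (eq : Int) (last : PySem.Dict Int Int) (found : Bool),
    pvLoopB cs eq last found = pvSpecD (pvDL cs eq) last found := by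
  induction cs with
  | nil => intro eq last found; simp [pvLoopB, pvDL, pvSpecD]
  | cons c r ih =>
    intro eq last found
    simp only [pvLoopB, pvDL]
    by_cases hq : c = '='
    · simp only [if_pos hq]; exact ih (eq + 1) last found
    · simp only [if_neg hq]
      by_cases hd9 : '1' ≤ c ∧ c ≤ '9'
      · have hyd : pvIsDig c = true := by
          simp only [pvIsDig]
          obtain ⟨h1, h9⟩ := hd9
          rw [Char.le_def] at h1 h9
          have e1 : (49 : Nat) ≤ c.val.toNat := UInt32.le_iff_toNat_le.mp h1
          have e9 : c.val.toNat ≤ (57 : Nat) := UInt32.le_iff_toNat_le.mp h9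
          have hcc : c.toNat = c.val.toNat := rfl
          simp only [Bool.not_eq_true', Bool.or_eq_false_iff,
            decide_eq_false_iff_not]
          omega
        simp only [if_pos hd9, hyd, if_true, pvSpecD]
        cases hgl : last.get? (10 - pvDv c) with
        | none => exact ih eq (last.insert (pvDv c) eq) found
        | some v =>
          by_cases hlt : eq - v < 3
          · simp [hlt]
          · simp only [if_neg hlt]
            exact ih eq (last.insert (pvDv c) eq) true
      · have hnd : pvIsDig c = false := by
          simp only [pvIsDig]
          by_contra hcon
          simp only [Bool.not_eq_false, Bool.not_eq_true', Bool.or_eq_false_iff,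
            decide_eq_false_iff_not] at hcon
          apply hd9
          have hcc : c.toNat = c.val.toNat := rfl
          have e1 : (49 : Nat) ≤ c.val.toNat := by omega
          have e9 : c.val.toNat ≤ (57 : Nat) := by omega
          exact ⟨Char.le_def.mpr (UInt32.le_iff_toNat_le.mpr e1),
                 Char.le_def.mpr (UInt32.le_iff_toNat_le.mpr e9)⟩
        simp only [if_neg hd9, hnd, Bool.false_eq_true, if_false]
        exact ih eq last found

theorem pvSpecD_eq_specL (l : List (Int × Int)) :
    ∀ (last : PySem.Dict Int Int) (h : List (Int × Int)) (f : Bool),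
    (∀ d : Int, last.get? d = (h.find? (fun p => p.1 == d)).map Prod.snd) →
    pvSpecD l last f = pvSpecL l h f := by
  induction l with
  | nil => intro last h f _; simp [pvSpecD, pvSpecL]
  | cons p l ih =>
    intro last h f hinv
    obtain ⟨b, e⟩ := p
    simp only [pvSpecD, pvSpecL, hinv (10 - b)]
    have hins : ∀ d : Int, ((last.insert b e).get? d)
        = ((((b, e) :: h).find? fun p => p.1 == d).map Prod.snd) := by
      intro d
      rw [PySem.Dict.get?_insert]
      by_cases hdb : d = b
      · subst hdb; simp [List.find?]
      · simp only [if_neg hdb, List.find?]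
        have : (b == d) = false := by simp [Ne.symm hdb]
        rw [this]
        exact hinv d
    cases hf : (h.find? fun p => p.1 == 10 - b) with
    | none => simp only [Option.map_none]; exact ih _ _ f hins
    | some p0 =>
      simp only [Option.map_some]
      by_cases hlt : e - p0.2 < 3
      · simp [hlt]
      · simp only [if_neg hlt]
        exact ih _ _ true hins

theorem pvFind_max (h : List (Int × Int)) (d : Int)
    (hm : h.Pairwise (fun p q => q.2 ≤ p.2)) (p0 : Int × Int)
    (hf : h.find? (fun p => p.1 == d) = some p0) :
    ∀ p ∈ h, p.1 = d → p.2 ≤ p0.2 := by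
  induction h with
  | nil => simp at hf
  | cons x h ih =>
    by_cases hx : (x.1 == d) = true
    · simp only [List.find?, hx] at hf
      obtain rfl : x = p0 := by simpa using hf
      intro p hp _
      rcases List.mem_cons.mp hp with rfl | hp
      · exact le_refl _
      · exact (List.pairwise_cons.mp hm).1 p hp
    · simp only [Bool.not_eq_true] at hx
      simp only [List.find?, hx] at hf
      intro p hp hpd
      rcases List.mem_cons.mp hp with rfl | hp
      · simp [hpd] at hx
      · exact ih (List.pairwise_cons.mp hm).2 hf p hp hpd

theorem pvSpecL_char (l : List (Int × Int)) : ∀ (h : List (Int × Int)) (f : Bool),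
    (∀ p ∈ h, ∀ q ∈ l, p.2 ≤ q.2) →
    l.Pairwise (fun p q => p.2 ≤ q.2) →
    h.Pairwise (fun p q => q.2 ≤ p.2) →
    pvSpecL l h f =
      if pvOk l && pvCrossOk h l then some (f || (pvEx l || pvCrossEx h l)) else none := by
  induction l with
  | nil => intro h f _ _ _; simp [pvSpecL, pvOk, pvEx, pvCrossOk, pvCrossEx]
  | cons p l ih =>
    intro h f hcross hl hh
    obtain ⟨b, e⟩ := p
    have hl' : l.Pairwise (fun p q => p.2 ≤ q.2) := (List.pairwise_cons.mp hl).2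
    have hhead : ∀ q ∈ l, e ≤ q.2 := fun q hq => (List.pairwise_cons.mp hl).1 q hq
    have hcross' : ∀ p ∈ (b, e) :: h, ∀ q ∈ l, p.2 ≤ q.2 := by
      intro p hp q hq
      rcases List.mem_cons.mp hp with rfl | hp
      · exact hhead q hq
      · exact hcross p hp q (List.mem_cons_of_mem _ hq)
    have hh' : ((b, e) :: h).Pairwise (fun p q => q.2 ≤ p.2) := by
      refine List.pairwise_cons.mpr ⟨?_, hh⟩
      intro p hp
      exact hcross p hp (b, e) List.mem_cons_self
    -- expand the RHS condition and payload
    simp only [pvSpecL, pvOk, pvEx, pvCrossOk, pvCrossEx, List.all_cons, List.any_cons]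
    cases hf : (h.find? fun p => p.1 == 10 - b) with
    | none =>
      have hno : ∀ p ∈ h, (p.1 + b == 10) = false := by
        intro p hp
        have h1 : p.1 ≠ 10 - b := by simpa using List.find?_eq_none.mp hf p hp
        simp only [beq_eq_false_iff_ne, ne_eq]
        omega
      have hallh : (h.all fun p => !(p.1 + b == 10) || decide (3 ≤ e - p.2)) = true := by
        rw [List.all_eq_true]; intro p hp; simp [hno p hp]
      have hanyh : (h.any fun p => p.1 + b == 10) = false := by
        rw [List.any_eq_false]; intro p hp; simp [hno p hp]
      rw [ih ((b, e) :: h) f hcross' hl' hh']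
      simp only [pvCrossOk, pvCrossEx, List.all_cons, List.any_cons, pvAllAnd, pvAnyOr,
        hallh, hanyh]
      cases (l.all fun q => !(b + q.1 == 10) || decide (3 ≤ q.2 - e)) <;>
        cases pvOk l <;>
        cases (l.all fun q => h.all fun p => !(p.1 + q.1 == 10) || decide (3 ≤ q.2 - p.2)) <;>
        cases (l.any fun q => b + q.1 == 10) <;> cases pvEx l <;>
        cases (l.any fun q => h.any fun p => p.1 + q.1 == 10) <;> cases f <;> simp
    | some p0 =>
      have hp0m : p0 ∈ h := List.mem_of_find?_eq_some hf
      have hp0d : p0.1 = 10 - b := by have := List.find?_some hf; simpa using this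
      have hanyh : (h.any fun p => p.1 + b == 10) = true := by
        rw [List.any_eq_true]
        exact ⟨p0, hp0m, by simp only [beq_iff_eq]; omega⟩
      by_cases hlt : e - p0.2 < 3
      · have hallh : (h.all fun p => !(p.1 + b == 10) || decide (3 ≤ e - p.2)) = false := by
          rw [List.all_eq_false]
          refine ⟨p0, hp0m, ?_⟩
          simp only [Bool.or_eq_true, Bool.not_eq_true', beq_eq_false_iff_ne, ne_eq,
            decide_eq_true_eq, not_or, Decidable.not_not]
          exact ⟨by omega, by omega⟩
        simp [hlt, hallh]
      · have hallh : (h.all fun p => !(p.1 + b == 10) || decide (3 ≤ e - p.2)) = true := by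
          rw [List.all_eq_true]
          intro p hp
          by_cases hm : (p.1 + b == 10) = true
          · have hple : p.2 ≤ p0.2 := by
              apply pvFind_max h (10 - b) hh p0 hf p hp
              simp only [beq_iff_eq] at hm; omega
            simp only [hm, Bool.not_true, Bool.false_or, decide_eq_true_eq]; omega
          · simp only [Bool.not_eq_true] at hm; simp [hm]
        dsimp only
        rw [if_neg hlt, ih ((b, e) :: h) true hcross' hl' hh']
        simp only [pvCrossOk, pvCrossEx, List.all_cons, List.any_cons, pvAllAnd, pvAnyOr,
          hallh, hanyh]
        cases (l.all fun q => !(b + q.1 == 10) || decide (3 ≤ q.2 - e)) <;>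
          cases pvOk l <;>
          cases (l.all fun q => h.all fun p => !(p.1 + q.1 == 10) || decide (3 ≤ q.2 - p.2)) <;>
          cases f <;> simp

-- ===== VERDICT (by name: the statement is the Claim_ definition above) =====
theorem white_walkers_spec : Claim_equal_white_walkers := by
  intro village _
  unfold Spec_white_walkers white_walkers white_walkers_alt
  rw [pvOuterA_char village.toList 0 false, pvLoopB_spec,
      pvSpecD_eq_specL _ _ [] false (by intro d; simp [PySem.Dict.get?_empty]),
      pvSpecL_char _ [] false (by simp) ((pvDL_mono village.toList 0).2) (by simp)]
  have hz : ((pvDL village.toList 0).any fun _ => false) = false := by simp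
  simp [pvCrossOk, pvCrossEx, hz]
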